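-- pv_equiv track=rewrite | github.com/MrGallo/advent-of-code-solutions | 2016/day_07/day_07.py | has_abba_pattern
-- ===== SOURCE A (Python) =====
-- def has_abba_pattern(string: str) -> bool:
--     i = 0
--     while i < len(string) - 3:
--         c1, c2, c3, c4 = string[i:i+4]
--         if c1 == c4 and c2 == c3 and c1 != c2:
--             return True
--         i += 1
--     return False
-- ===== SOURCE B (Python) =====
-- def has_abba_pattern(string: str) -> bool:
--     # Stage 1: an ABBA must have an equal adjacent pair ("BB") at its center;
--     # collect all such center positions j (string[j] == string[j+1]).
--     centers = [j for j in range(len(string) - 1) if string[j] == string[j + 1]]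
--     # Stage 2: a center j is a true ABBA center iff both wings exist,
--     # are equal to each other, and differ from the center character.
--     return any(1 <= j <= len(string) - 3
--                and string[j - 1] == string[j + 2]
--                and string[j - 1] != string[j]
--                for j in centers)
-- ===== Notes on version B (the rewrite author's own statement) =====
-- stated objective: alternative
-- what changed: Replaces A's scan of every 4-char window by a two-stage center-based search: first collect all equal-adjacent-pair positions (the 'BB' centers), then check only those centers' wings for equality and difference from the center.
import Mathlib
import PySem

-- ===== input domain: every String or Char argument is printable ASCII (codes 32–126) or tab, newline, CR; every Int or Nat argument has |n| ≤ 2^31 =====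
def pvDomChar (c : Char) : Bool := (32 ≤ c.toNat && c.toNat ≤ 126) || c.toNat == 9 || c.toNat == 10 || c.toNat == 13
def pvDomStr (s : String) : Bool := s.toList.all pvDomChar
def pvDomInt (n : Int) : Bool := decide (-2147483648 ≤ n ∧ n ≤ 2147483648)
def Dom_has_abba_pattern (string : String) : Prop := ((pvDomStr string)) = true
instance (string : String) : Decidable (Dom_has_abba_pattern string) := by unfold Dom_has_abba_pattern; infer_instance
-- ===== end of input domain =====

-- B replaces A's scan of every 4-char window by a two-stage center-based search:
-- collect equal-adjacent-pair positions first, then check only those centers' wings.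

-- ===== PORT A =====
-- while i < len(string) - 3: slice string[i:i+4], unpack, test, i += 1
def hasAbbaLoopA (cs : List Char) (i : Nat) : Bool :=
  if _h : (i : Int) < (cs.length : Int) - 3 then
    match PySem.List.slice cs (some (i : Int)) (some ((i : Int) + 4)) with
    | [c1, c2, c3, c4] =>
      if c1 == c4 && c2 == c3 && c1 != c2 then true else hasAbbaLoopA cs (i + 1)
    | _ => false   -- unreachable: the guard guarantees a length-4 slice (tuple unpack never raises)
  else
    false
termination_by cs.length - i
decreasing_by omega

def has_abba_pattern (string : String) : Bool :=
  hasAbbaLoopA string.toList 0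

-- ===== PORT B =====
-- centers = [j for j in range(len(s)-1) if s[j] == s[j+1]]
-- return any(1 <= j <= len(s)-3 and s[j-1] == s[j+2] and s[j-1] != s[j] for j in centers)
-- (all indexing is in range: j comes from range(len-1) and the wings are guarded)
def has_abba_pattern_alt (string : String) : Bool :=
  let cs := string.toList
  let centers := (List.range (cs.length - 1)).filter
    (fun j => cs.getD j ' ' == cs.getD (j + 1) ' ')
  centers.any (fun j =>
    decide (1 ≤ j) && decide ((j : Int) ≤ (cs.length : Int) - 3) &&
    (cs.getD (j - 1) ' ' == cs.getD (j + 2) ' ') &&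
    (cs.getD (j - 1) ' ' != cs.getD j ' '))

-- ===== PRECONDITION & SPEC =====
def Spec_has_abba_pattern (string : String) (out : Bool) : Prop := out = has_abba_pattern_alt string
instance (string : String) (out : Bool) : Decidable (Spec_has_abba_pattern string out) := by unfold Spec_has_abba_pattern; infer_instance

-- ===== CLAIM (what is proved, stated in full; the proofs are below) =====
def Claim_equal_has_abba_pattern : Prop := ∀ (string : String), Dom_has_abba_pattern string → Spec_has_abba_pattern string (has_abba_pattern string)

-- ===== LEMMAS AND PROOFS =====

-- the ABBA window condition at start position k, total via getD
def W (cs : List Char) (k : Nat) : Bool :=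
  (cs.getD k ' ' == cs.getD (k + 3) ' ') && (cs.getD (k + 1) ' ' == cs.getD (k + 2) ' ')
    && (cs.getD k ' ' != cs.getD (k + 1) ' ')

theorem getD_drop (cs : List Char) (i m : Nat) :
    (cs.drop i).getD m ' ' = cs.getD (i + m) ' ' := by
  simp [List.getD_eq_getElem?_getD, List.getElem?_drop]

theorem loopA_iff (cs : List Char) (i : Nat) :
    hasAbbaLoopA cs i = true ↔ ∃ k, i ≤ k ∧ k + 4 ≤ cs.length ∧ W cs k = true := by
  by_cases h : (i : Int) < (cs.length : Int) - 3
  · have hlen : i + 4 ≤ cs.length := by omega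
    have hslice : PySem.List.slice cs (some (i : Int)) (some ((i : Int) + 4)) =
        (cs.drop i).take 4 := by
      have := PySem.List.slice_natCast_add cs i 4
      simpa using this
    have hd : ∃ c1 c2 c3 c4 t, cs.drop i = c1 :: c2 :: c3 :: c4 :: t := by
      have hl : 4 ≤ (cs.drop i).length := by simp [List.length_drop]; omega
      match hds : cs.drop i with
      | c1 :: c2 :: c3 :: c4 :: t => exact ⟨c1, c2, c3, c4, t, rfl⟩
      | [] | [_] | [_,_] | [_,_,_] => simp [hds] at hl
    obtain ⟨c1, c2, c3, c4, t, hds⟩ := hd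
    have e0 : cs.getD i ' ' = c1 := by
      have := getD_drop cs i 0; rw [hds] at this; simpa using this.symm
    have e1 : cs.getD (i + 1) ' ' = c2 := by
      have := getD_drop cs i 1; rw [hds] at this; simpa using this.symm
    have e2 : cs.getD (i + 2) ' ' = c3 := by
      have := getD_drop cs i 2; rw [hds] at this; simpa using this.symm
    have e3 : cs.getD (i + 3) ' ' = c4 := by
      have := getD_drop cs i 3; rw [hds] at this; simpa using this.symm
    have hW : W cs i = (c1 == c4 && c2 == c3 && c1 != c2) := by
      unfold W; rw [e0, e1, e2, e3]
    rw [hasAbbaLoopA, dif_pos h, hslice, hds]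
    simp only [List.take]
    by_cases hc : (c1 == c4 && c2 == c3 && c1 != c2) = true
    · simp only [if_pos hc, true_iff]
      exact ⟨i, le_refl _, hlen, by rw [hW]; exact hc⟩
    · rw [if_neg hc, loopA_iff cs (i + 1)]
      constructor
      · rintro ⟨k, hk, h4, hw⟩; exact ⟨k, by omega, h4, hw⟩
      · rintro ⟨k, hk, h4, hw⟩
        rcases Nat.lt_or_ge i k with hik | hik
        · exact ⟨k, by omega, h4, hw⟩
        · have : k = i := by omega
          subst this; rw [hW] at hw; exact absurd hw hc
  · rw [hasAbbaLoopA, dif_neg h]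
    constructor
    · intro hf; exact absurd hf (by simp)
    · rintro ⟨k, hk, h4, _⟩; exfalso; omega
termination_by cs.length - i
decreasing_by omega

theorem alt_iff (s : String) :
    has_abba_pattern_alt s = true ↔
      ∃ k, 0 ≤ k ∧ k + 4 ≤ s.toList.length ∧ W s.toList k = true := by
  unfold has_abba_pattern_alt
  simp only [List.any_eq_true, List.mem_filter, List.mem_range, Bool.and_eq_true,
    decide_eq_true_eq]
  constructor
  · rintro ⟨j, ⟨hjr, hc⟩, ⟨⟨hj1, hj3⟩, hwing⟩, hdiff⟩
    refine ⟨j - 1, Nat.zero_le _, by omega, ?_⟩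
    have h1 : j - 1 + 1 = j := by omega
    have h2 : j - 1 + 2 = j + 1 := by omega
    have h3 : j - 1 + 3 = j + 2 := by omega
    unfold W
    rw [h1, h2, h3]
    simp only [Bool.and_eq_true]
    exact ⟨⟨hwing, hc⟩, hdiff⟩
  · rintro ⟨k, -, h4, hw⟩
    unfold W at hw
    simp only [Bool.and_eq_true] at hw
    obtain ⟨⟨houter, hcenter⟩, hdiff⟩ := hw
    refine ⟨k + 1, ⟨by omega, hcenter⟩, ⟨⟨by omega, by push_cast; omega⟩, ?_⟩, ?_⟩
    · exact houter
    · exact hdiff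

-- ===== VERDICT (by name: the statement is the Claim_ definition above) =====
theorem has_abba_pattern_spec : Claim_equal_has_abba_pattern := by
  intro s _
  show has_abba_pattern s = has_abba_pattern_alt s
  have hA := loopA_iff s.toList 0
  have hB := alt_iff s
  rw [Bool.eq_iff_iff]
  exact (show has_abba_pattern s = true ↔ _ from hA).trans
    ((by constructor <;> (rintro ⟨k, hk, h4, hw⟩; exact ⟨k, Nat.zero_le _, h4, hw⟩) :
      (∃ k, 0 ≤ k ∧ k + 4 ≤ s.toList.length ∧ W s.toList k = true) ↔
      (∃ k, 0 ≤ k ∧ k + 4 ≤ s.toList.length ∧ W s.toList k = true)).trans hB.symm)
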